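-- pv_equiv track=rewrite | github.com/Expelliarmus3/DSA | Extractionofdigits-1.py | get_fac_optimal_sol
-- ===== SOURCE A (Python) =====
-- import math
--
-- def get_fac_optimal_sol(n):
--     factors=[]
--     for i in range(1, int(math.sqrt(n))+1):
--         if n%i==0:
--             factors.append(i)
--             if n//i!=i:
--                 factors.append(n//i)
--     factors.sort()
--     return factors
-- ===== SOURCE B (Python) =====
-- def get_fac_optimal_sol(n):
--     # two accumulators: small divisors come out ascending, cofactors descending,
--     # so the answer is small + reversed(large) with no sort and no math.sqrt
--     small = []
--     large = []
--     i = 1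
--     while i * i <= n:
--         if n % i == 0:
--             small.append(i)
--             if i != n // i:
--                 large.append(n // i)
--         i += 1
--     return small + large[::-1]
-- ===== Notes on version B (the rewrite author's own statement) =====
-- stated objective: alternative
-- what changed: Replaces the sqrt-bounded collect-then-sort (one interleaved list, final .sort()) by a while loop keeping two accumulators (small divisors ascending, cofactors descending) whose concatenation with one reversal is already sorted, with no math.sqrt and no sort call.
import Mathlib
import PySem

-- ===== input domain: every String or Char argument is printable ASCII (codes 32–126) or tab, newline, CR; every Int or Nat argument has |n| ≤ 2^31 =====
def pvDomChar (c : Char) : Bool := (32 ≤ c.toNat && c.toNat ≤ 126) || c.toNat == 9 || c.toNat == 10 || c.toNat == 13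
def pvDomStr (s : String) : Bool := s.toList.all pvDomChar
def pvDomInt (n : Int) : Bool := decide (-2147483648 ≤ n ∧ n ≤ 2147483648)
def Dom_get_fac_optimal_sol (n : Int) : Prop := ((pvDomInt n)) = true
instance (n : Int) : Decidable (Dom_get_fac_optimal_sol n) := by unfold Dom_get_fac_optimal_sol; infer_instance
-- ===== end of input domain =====

-- B replaces A's sqrt-bounded collect-then-sort by a two-accumulator while loop whose
-- concatenation (small divisors ascending ++ reversed descending cofactors) needs no sort (alternative, same cost).

-- ===== PORT A =====
-- int(math.sqrt(n)) is ported as Nat.sqrt n.toNat, exact for 0 ≤ n ≤ 2^31 (Pre_ excludes n < 0, where math.sqrt raises).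
def get_fac_optimal_sol (n : Int) : List Int :=
  let factors : List Int :=
    (PySem.List.pyRange 1 (((Nat.sqrt n.toNat : Nat) : Int) + 1) 1).foldl
      (fun factors i =>
        if PySem.Int.mod n i = 0 then
          let factors1 := factors ++ [i]
          if ¬ (PySem.Int.floordiv n i = i) then factors1 ++ [PySem.Int.floordiv n i]
          else factors1
        else factors) []
  PySem.List.sorted factors (fun x => x)

-- ===== PORT B =====
-- the 'while i * i <= n' loop of Source B; the Nat fuel only makes the recursion structural
-- (n+1 steps always suffice: the loop runs while i*i <= n, so for at most n iterations from i = 1)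
def pvLoopB (n : Int) (fuel : Nat) (i : Int) (small large : List Int) : List Int × List Int :=
  match fuel with
  | 0 => (small, large)
  | fuel + 1 =>
    if i * i ≤ n then
      if PySem.Int.mod n i = 0 then
        pvLoopB n fuel (i + 1) (small ++ [i])
          (if ¬ (i = PySem.Int.floordiv n i) then large ++ [PySem.Int.floordiv n i] else large)
      else
        pvLoopB n fuel (i + 1) small large
    else
      (small, large)

-- large[::-1] is ported as List.reverse (PySem.List.slice?_none_none_neg_one: xs[::-1] = xs.reverse)
def get_fac_optimal_sol_alt (n : Int) : List Int :=
  let p := pvLoopB n (n + 1).toNat 1 [] []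
  p.1 ++ p.2.reverse

-- ===== PRECONDITION & SPEC =====
-- Pre_ excludes exactly n < 0, where A raises ValueError (math.sqrt of a negative).
def Pre_get_fac_optimal_sol (n : Int) : Prop := 0 ≤ n
instance (n : Int) : Decidable (Pre_get_fac_optimal_sol n) := by unfold Pre_get_fac_optimal_sol; infer_instance
def pvWitness_get_fac_optimal_sol : Int := 12

def Spec_get_fac_optimal_sol (n : Int) (out : List Int) : Prop := out = get_fac_optimal_sol_alt n
instance (n : Int) (out : List Int) : Decidable (Spec_get_fac_optimal_sol n out) := by unfold Spec_get_fac_optimal_sol; infer_instance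

-- ===== CLAIM (what is proved, stated in full; the proofs are below) =====
def Claim_equal_get_fac_optimal_sol : Prop := ∀ (n : Int), Dom_get_fac_optimal_sol n → Pre_get_fac_optimal_sol n → Spec_get_fac_optimal_sol n (get_fac_optimal_sol n)

-- ===== LEMMAS AND PROOFS =====

-- what A's loop body appends for a given i
def pvG (n i : Int) : List Int :=
  if PySem.Int.mod n i = 0 then
    (if ¬ (PySem.Int.floordiv n i = i) then [i, PySem.Int.floordiv n i] else [i])
  else []

-- the two filters B's loop accumulates (small divisors, then their cofactors)
def pvP (n : Int) : Int → Bool := fun j => PySem.Int.mod n j == 0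
def pvQ (n : Int) : Int → Bool := fun j => (PySem.Int.mod n j == 0) && !(j == PySem.Int.floordiv n j)

lemma pvA_eq_sorted_flatMap (n : Int) :
    get_fac_optimal_sol n =
      PySem.List.sorted ((PySem.List.pyRange 1 (((Nat.sqrt n.toNat : Nat) : Int) + 1) 1).flatMap (pvG n)) (fun x => x) := by
  unfold get_fac_optimal_sol
  have hbody : (fun (factors : List Int) (i : Int) =>
      if PySem.Int.mod n i = 0 then
        let factors1 := factors ++ [i]
        if ¬ (PySem.Int.floordiv n i = i) then factors1 ++ [PySem.Int.floordiv n i]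
        else factors1
      else factors) = (fun acc x => acc ++ pvG n x) := by
    funext acc i
    unfold pvG
    split_ifs <;> simp
  rw [hbody, PySem.List.foldl_append_eq_flatMap]
  simp

-- the square-root bracket, in Int
lemma pv_sqrt_le (n : Int) (hn : 0 ≤ n) :
    ((Nat.sqrt n.toNat : Nat) : Int) * ((Nat.sqrt n.toNat : Nat) : Int) ≤ n := by
  have h := Nat.sqrt_le' n.toNat
  rw [pow_two] at h
  have h2 : ((Nat.sqrt n.toNat * Nat.sqrt n.toNat : Nat) : Int) ≤ ((n.toNat : Nat) : Int) := by
    exact_mod_cast h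
  rw [Int.toNat_of_nonneg hn] at h2
  push_cast at h2
  exact h2

lemma pv_lt_sqrt_succ (n : Int) (hn : 0 ≤ n) :
    n < (((Nat.sqrt n.toNat : Nat) : Int) + 1) * (((Nat.sqrt n.toNat : Nat) : Int) + 1) := by
  have h := Nat.lt_succ_sqrt' n.toNat
  rw [pow_two] at h
  have h2 : ((n.toNat : Nat) : Int) < ((Nat.succ (Nat.sqrt n.toNat) * Nat.succ (Nat.sqrt n.toNat) : Nat) : Int) := by
    exact_mod_cast h
  rw [Int.toNat_of_nonneg hn] at h2
  push_cast [Nat.succ_eq_add_one] at h2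
  linarith

-- the loop guard i*i <= n is exactly i < isqrt(n)+1 (for i ≥ 1, n ≥ 0)
lemma pv_guard_iff (n i : Int) (hn : 0 ≤ n) (hi : 1 ≤ i) :
    i * i ≤ n ↔ i < ((Nat.sqrt n.toNat : Nat) : Int) + 1 := by
  have hs0 : (0:Int) ≤ ((Nat.sqrt n.toNat : Nat) : Int) := by positivity
  have h1 := pv_sqrt_le n hn
  have h2 := pv_lt_sqrt_succ n hn
  constructor
  · intro h
    by_contra hc
    push Not at hc
    nlinarith
  · intro h
    nlinarith

-- closed form of B's while loop, for any sufficient fuel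
lemma pvLoopB_spec (n : Int) (hn : 0 ≤ n) :
    ∀ (fuel : Nat) (i : Int), 1 ≤ i → ((((Nat.sqrt n.toNat : Nat) : Int) + 1) - i).toNat ≤ fuel →
      ∀ (small large : List Int),
      pvLoopB n fuel i small large =
        (small ++ (PySem.List.pyRange i (((Nat.sqrt n.toNat : Nat) : Int) + 1) 1).filter (pvP n),
         large ++ ((PySem.List.pyRange i (((Nat.sqrt n.toNat : Nat) : Int) + 1) 1).filter (pvQ n)).map
           (fun j => PySem.Int.floordiv n j)) := by
  intro fuel
  induction fuel with
  | zero =>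
    intro i hi hk small large
    have hend : ((Nat.sqrt n.toNat : Nat) : Int) + 1 ≤ i := by omega
    rw [pvLoopB, PySem.List.pyRange_one_eq_nil hend]
    simp
  | succ fuel ih =>
    intro i hi hk small large
    rw [pvLoopB]
    by_cases hguard : i * i ≤ n
    · have hlt : i < ((Nat.sqrt n.toNat : Nat) : Int) + 1 := (pv_guard_iff n i hn hi).mp hguard
      rw [if_pos hguard, PySem.List.pyRange_one_cons hlt]
      have hk' : ((((Nat.sqrt n.toNat : Nat) : Int) + 1) - (i + 1)).toNat ≤ fuel := by omega
      by_cases h1 : PySem.Int.mod n i = 0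
      · rw [if_pos h1, ih (i + 1) (by omega) hk']
        by_cases h2 : ¬ (i = PySem.Int.floordiv n i)
        · rw [if_pos h2]
          have hp : pvP n i = true := by simp [pvP, h1]
          have hq : pvQ n i = true := by simp [pvQ, h1, h2]
          simp [hp, hq]
        · rw [if_neg h2]
          have hp : pvP n i = true := by simp [pvP, h1]
          have hq : pvQ n i = false := by
            simp only [not_not] at h2
            simp [pvQ, h1, ← h2]
          simp [hp, hq]
      · rw [if_neg h1, ih (i + 1) (by omega) hk']
        have hp : pvP n i = false := by simp [pvP, h1]
        have hq : pvQ n i = false := by simp [pvQ, h1]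
        simp [hp, hq]
    · have hend : ((Nat.sqrt n.toNat : Nat) : Int) + 1 ≤ i := by
        by_contra hc
        exact hguard ((pv_guard_iff n i hn hi).mpr (by omega))
      rw [if_neg hguard, PySem.List.pyRange_one_eq_nil hend]
      simp

-- A's interleaved list is a permutation of B's (small divisors ++ cofactors) split, for any index list
lemma pv_flatMap_perm (n : Int) (l : List Int) :
    (l.flatMap (pvG n)).Perm
      ((l.filter (pvP n)) ++ ((l.filter (pvQ n)).map (fun j => PySem.Int.floordiv n j))) := by
  induction l with
  | nil => simp
  | cons j t ih =>
    simp only [List.flatMap_cons, List.filter_cons]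
    unfold pvG
    by_cases h1 : PySem.Int.mod n j = 0
    · by_cases h2 : ¬ (PySem.Int.floordiv n j = j)
      · have hp : pvP n j = true := by simp [pvP, h1]
        have hq : pvQ n j = true := by
          have hne : ¬ (j = PySem.Int.floordiv n j) := fun h => h2 h.symm
          simp [pvQ, h1, hne]
        rw [if_pos h1, if_pos h2]
        simp only [hp, hq, if_true, List.map_cons, List.cons_append]
        exact ((ih.cons _).trans List.perm_middle.symm).cons j
      · have hp : pvP n j = true := by simp [pvP, h1]
        have hq : pvQ n j = false := by
          simp only [not_not] at h2
          simp [pvQ, h1, h2]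
        rw [if_pos h1, if_neg h2]
        simp only [hp, hq, if_true, List.cons_append]
        exact ih.cons j
    · have hp : pvP n j = false := by simp [pvP, h1]
      have hq : pvQ n j = false := by simp [pvQ, h1]
      simp only [if_neg h1, hp, hq, List.nil_append]
      exact ih

-- B's output is strictly increasing
lemma pv_alt_pairwise (n : Int) (hn : 0 ≤ n) :
    (((PySem.List.pyRange 1 (((Nat.sqrt n.toNat : Nat) : Int) + 1) 1).filter (pvP n)) ++
      (((PySem.List.pyRange 1 (((Nat.sqrt n.toNat : Nat) : Int) + 1) 1).filter (pvQ n)).map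
        (fun j => PySem.Int.floordiv n j)).reverse).Pairwise (fun a b => a < b) := by
  set s : Int := ((Nat.sqrt n.toNat : Nat) : Int) with hs
  have hs0 : 0 ≤ s := by positivity
  have hss : s * s ≤ n := pv_sqrt_le n hn
  -- any Q-selected j in the range has a cofactor n // j that is > s
  have hcof : ∀ j ∈ (PySem.List.pyRange 1 (s + 1) 1).filter (pvQ n), s < PySem.Int.floordiv n j := by
    intro j hj
    rcases List.mem_filter.mp hj with ⟨hjr, hjq⟩
    rcases PySem.List.mem_pyRange_one.mp hjr with ⟨hj1, hj2⟩
    have hjpq : PySem.Int.mod n j = 0 ∧ ¬ (j = PySem.Int.floordiv n j) := by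
      simpa [pvQ] using hjq
    obtain ⟨hjm', hjne'⟩ := hjpq
    have hq : PySem.Int.floordiv n j * j = n := by
      have h := PySem.Int.floordiv_mul_add_mod n j
      omega
    have hge : s ≤ PySem.Int.floordiv n j := by
      rw [PySem.Int.le_floordiv_iff_mul_le (by omega : (0:Int) < j)]
      nlinarith
    rcases lt_or_eq_of_le hge with h | h
    · exact h
    · exfalso
      -- n // j = s forces j = s = n // j
      have : j = s := by nlinarith [hq, hss]
      exact hjne' (by omega)
  rw [List.pairwise_append]
  refine ⟨(PySem.List.pairwise_lt_pyRange_one 1 (s + 1)).filter _, ?_, ?_⟩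
  · -- cofactors are strictly decreasing, so their reverse is strictly increasing
    rw [List.pairwise_reverse, List.pairwise_map]
    refine ((PySem.List.pairwise_lt_pyRange_one 1 (s + 1)).filter (pvQ n)).imp_of_mem ?_
    intro a b ha hb hab
    rcases List.mem_filter.mp ha with ⟨har, haq⟩
    rcases List.mem_filter.mp hb with ⟨hbr, hbq⟩
    rcases PySem.List.mem_pyRange_one.mp har with ⟨ha1, ha2⟩
    rcases PySem.List.mem_pyRange_one.mp hbr with ⟨hb1, hb2⟩
    have ham : PySem.Int.mod n a = 0 := by
      have h := haq; simp [pvQ] at h; exact h.1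
    have hbm : PySem.Int.mod n b = 0 := by
      have h := hbq; simp [pvQ] at h; exact h.1
    have hqa : PySem.Int.floordiv n a * a = n := by
      have h := PySem.Int.floordiv_mul_add_mod n a; omega
    have hqb : PySem.Int.floordiv n b * b = n := by
      have h := PySem.Int.floordiv_mul_add_mod n b; omega
    have hfb : 1 ≤ PySem.Int.floordiv n b := by nlinarith
    nlinarith
  · -- every small divisor is ≤ s < every cofactor
    intro x hx y hy
    rcases List.mem_filter.mp hx with ⟨hxr, -⟩
    rcases PySem.List.mem_pyRange_one.mp hxr with ⟨hx1, hx2⟩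
    rw [List.mem_reverse] at hy
    rcases List.mem_map.mp hy with ⟨j, hj, rfl⟩
    have := hcof j hj
    omega

-- ===== VERDICT (by name: the statement is the Claim_ definition above) =====
theorem get_fac_optimal_sol_spec : Claim_equal_get_fac_optimal_sol := by
  intro n _ hpre
  unfold Spec_get_fac_optimal_sol get_fac_optimal_sol_alt
  have hfuel : ((((Nat.sqrt n.toNat : Nat) : Int) + 1) - 1).toNat ≤ (n + 1).toNat := by
    have h1 := pv_sqrt_le n hpre
    have h2 : 2 * ((Nat.sqrt n.toNat : Nat) : Int) - 1 ≤ ((Nat.sqrt n.toNat : Nat) : Int) * ((Nat.sqrt n.toNat : Nat) : Int) := by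
      nlinarith [mul_self_nonneg (((Nat.sqrt n.toNat : Nat) : Int) - 1)]
    omega
  rw [pvA_eq_sorted_flatMap, pvLoopB_spec n hpre _ 1 (by omega) hfuel [] []]
  simp only [List.nil_append]
  apply PySem.List.sorted_eq_of_perm_of_pairwise_lt
  · exact (List.Perm.append (List.Perm.refl _) (List.reverse_perm _)).trans
      (pv_flatMap_perm n _).symm
  · exact pv_alt_pairwise n hpre
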